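-- pv_equiv track=rewrite | github.com/kammitama5/Distracting_KATAS | doubleeveryother.py | double_every_other
-- ===== SOURCE A (Python) =====
-- def double_every_other(lst):
--       listy = []
--       for count, i in enumerate(lst):
--           if count % 2 == 1:
--             listy.append(i * 2)
--           else:
--             listy.append(i)
--       return listy
-- ===== SOURCE B (Python) =====
-- def double_every_other(lst):
--     result = list(lst)
--     result[1::2] = [x * 2 for x in result[1::2]]
--     return result
-- ===== Notes on version B (the rewrite author's own statement) =====
-- stated objective: idiomatic
-- what changed: Replaces the enumerate loop with a parity branch per element by copying the list and doubling only the odd-index elements via one strided slice assignment result[1::2].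
import Mathlib
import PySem

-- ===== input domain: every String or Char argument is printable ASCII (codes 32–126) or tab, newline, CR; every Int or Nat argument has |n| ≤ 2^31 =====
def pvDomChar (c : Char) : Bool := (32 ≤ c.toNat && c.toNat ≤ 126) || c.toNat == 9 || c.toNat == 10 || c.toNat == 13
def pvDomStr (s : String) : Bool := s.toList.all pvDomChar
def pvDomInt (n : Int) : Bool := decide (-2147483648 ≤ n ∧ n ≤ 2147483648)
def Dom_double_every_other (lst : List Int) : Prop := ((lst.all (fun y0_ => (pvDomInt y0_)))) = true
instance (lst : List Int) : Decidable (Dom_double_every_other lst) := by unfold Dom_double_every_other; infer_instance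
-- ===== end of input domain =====

-- ===== PORT A =====
-- A: loop over enumerate(lst), appending i*2 at odd counts and i at even counts.
def double_every_other (lst : List Int) : List Int :=
  (PySem.List.enumerate lst).foldl
    (fun listy ci =>
      if PySem.Int.mod ci.1 2 == 1 then listy ++ [ci.2 * 2] else listy ++ [ci.2])
    []

-- ===== PORT B =====
-- hand port of the strided read `result[1::2]`: elements at odd indices (exact)
def pvOddStride : List Int → List Int
  | [] => []
  | [_] => []
  | _ :: b :: rest => b :: pvOddStride rest

-- hand port of the strided slice assignment `result[1::2] = vs`, exact when
-- vs has the same length as result[1::2] (always the case in Source B)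
def pvOddStrideAssign : List Int → List Int → List Int
  | [], _ => []
  | [a], _ => [a]
  | a :: b :: rest, [] => a :: b :: rest
  | a :: _ :: rest, v :: vs => a :: v :: pvOddStrideAssign rest vs

-- B: copy the list, then overwrite the odd-index stride with its doubled values.
def double_every_other_alt (lst : List Int) : List Int :=
  let result := lst
  pvOddStrideAssign result ((pvOddStride result).map (fun x => x * 2))

-- ===== PRECONDITION & SPEC =====
def Spec_double_every_other (lst : List Int) (out : List Int) : Prop := out = double_every_other_alt lst
instance (lst : List Int) (out : List Int) : Decidable (Spec_double_every_other lst out) := by unfold Spec_double_every_other; infer_instance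

-- ===== CLAIM (what is proved, stated in full; the proofs are below) =====
def Claim_equal_double_every_other : Prop := ∀ (lst : List Int), Dom_double_every_other lst → Spec_double_every_other lst (double_every_other lst)

-- ===== LEMMAS AND PROOFS =====

-- the value A's loop produces from counter s onward
def pvGo (s : Int) : List Int → List Int
  | [] => []
  | x :: xs => (if PySem.Int.mod s 2 == 1 then x * 2 else x) :: pvGo (s + 1) xs

theorem pvFoldl_eq_go (xs : List Int) : ∀ (s : Int) (acc : List Int),
    (PySem.List.enumerate xs s).foldl
      (fun listy ci =>
        if PySem.Int.mod ci.1 2 == 1 then listy ++ [ci.2 * 2] else listy ++ [ci.2])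
      acc = acc ++ pvGo s xs := by
  induction xs with
  | nil => intro s acc; simp [PySem.List.enumerate_nil, pvGo]
  | cons x xs ih =>
      intro s acc
      rw [PySem.List.enumerate_cons, List.foldl_cons, ih]
      simp only [pvGo]
      by_cases h : s % 2 = 1 <;> simp [h, List.append_assoc]

theorem pvGo_shift (xs : List Int) : ∀ (s : Int), pvGo (s + 2) xs = pvGo s xs := by
  induction xs with
  | nil => intro s; rfl
  | cons x xs ih =>
      intro s
      have hmod : PySem.Int.mod (s + 2) 2 = PySem.Int.mod s 2 := by
        show (s + 2).fmod 2 = s.fmod 2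
        simpa using Int.add_mul_fmod_self_left (a := s) (b := 2) (c := 1)
      simp only [pvGo, hmod]
      rw [show s + 2 + 1 = s + 1 + 2 by ring, ih]

theorem pvGo_zero (xs : List Int) :
    pvGo 0 xs = pvOddStrideAssign xs ((pvOddStride xs).map (fun x => x * 2)) := by
  induction xs using pvOddStride.induct with
  | case1 => rfl
  | case2 a => rfl
  | case3 a b rest ih =>
      have h02 : pvGo 2 rest = pvGo 0 rest := by simpa using pvGo_shift rest 0
      simp [pvGo, pvOddStride, pvOddStrideAssign, PySem.Int.mod, h02, ih]

-- ===== VERDICT (by name: the statement is the Claim_ definition above) =====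
theorem double_every_other_spec : Claim_equal_double_every_other := by
  intro lst _
  unfold Spec_double_every_other double_every_other double_every_other_alt
  rw [pvFoldl_eq_go, List.nil_append, pvGo_zero]
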